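-- pv_equiv track=rewrite | github.com/JimCatacora/bespa | mwh_tvs/mywayhometv.py | get_digit_offsets
-- ===== SOURCE A (Python) =====
-- def get_digit_offsets(station, num_digits, random_sz, mods):
--     offset = []
--     for canonical_digit in range(num_digits):
--         count = 0
--         dec_count = 0
--         for i, station_digit in enumerate(station):
--             count += int(station_digit > canonical_digit) * mods[i]
--             count += station_digit * i * mods[max(i - 1, 0)]
--             count += int(station_digit == canonical_digit) * dec_count
--             count = count % random_sz
--             dec_count += station_digit * mods[i]
--         offset.append(count)
--     return offset
-- ===== SOURCE B (Python) =====
-- def get_digit_offsets(station, num_digits, random_sz, mods):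
--     if num_digits <= 0:
--         return []
--     diff = [0] * (num_digits + 1)
--     point = [0] * num_digits
--     base = 0
--     dec = 0
--     for i, s in enumerate(station):
--         base += s * i * mods[max(i - 1, 0)]
--         if s > 0:
--             diff[0] += mods[i]
--             if s < num_digits:
--                 diff[s] -= mods[i]
--         if 0 <= s < num_digits:
--             point[s] += dec
--         dec += s * mods[i]
--     offset = []
--     run = 0
--     for d in range(num_digits):
--         run += diff[d]
--         offset.append((base + run + point[d]) % random_sz)
--     return offset
-- ===== Notes on version B (the rewrite author's own statement) =====
-- stated objective: faster
-- what changed: Replaces the O(num_digits*n) nested loops by a single pass over the station that buckets the '>canonical' contributions into a difference array and the '==canonical' contributions into per-digit point buckets, then emits all num_digits answers in one prefix-sum sweep.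
-- outside the precondition, e.g. on get_digit_offsets([], 1, 0, []): A returns [0], B raises ZeroDivisionError
import Mathlib
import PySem

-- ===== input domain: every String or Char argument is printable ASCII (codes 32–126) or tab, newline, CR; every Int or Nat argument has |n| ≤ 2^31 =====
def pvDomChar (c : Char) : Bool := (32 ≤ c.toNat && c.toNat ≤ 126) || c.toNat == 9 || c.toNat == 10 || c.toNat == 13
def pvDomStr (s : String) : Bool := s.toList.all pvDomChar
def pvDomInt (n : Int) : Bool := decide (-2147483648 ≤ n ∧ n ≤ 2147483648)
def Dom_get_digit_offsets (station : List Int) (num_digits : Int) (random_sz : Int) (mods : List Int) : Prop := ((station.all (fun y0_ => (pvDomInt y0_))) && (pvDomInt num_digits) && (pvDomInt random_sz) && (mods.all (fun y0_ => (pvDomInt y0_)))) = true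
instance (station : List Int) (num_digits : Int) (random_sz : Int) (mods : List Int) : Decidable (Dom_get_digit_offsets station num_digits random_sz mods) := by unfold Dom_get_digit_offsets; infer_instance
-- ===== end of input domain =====

-- B replaces A's num_digits × n nested loops by one bucketing pass over the station
-- (difference array for the '> canonical' term, point buckets for the '== canonical' term)
-- followed by one prefix-sum sweep over the canonical digits.

-- ===== PORT A =====
-- body of A's inner loop: state (count, dec_count), element (i, station_digit)
def pvStepA (canonical_digit random_sz : Int) (mods : List Int) (st : Int × Int) (is_ : Int × Int) : Int × Int :=
  let i := is_.1
  let station_digit := is_.2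
  let count := st.1 + (if station_digit > canonical_digit then (1 : Int) else 0) * PySem.List.pyGetD mods i 0
  let count := count + station_digit * i * PySem.List.pyGetD mods (max (i - 1) 0) 0
  let count := count + (if station_digit = canonical_digit then (1 : Int) else 0) * st.2
  let count := PySem.Int.mod count random_sz
  (count, st.2 + station_digit * PySem.List.pyGetD mods i 0)

def get_digit_offsets (station : List Int) (num_digits : Int) (random_sz : Int) (mods : List Int) : List Int :=
  (PySem.List.pyRange 0 num_digits 1).foldl (fun offset canonical_digit =>
    offset ++ [((PySem.List.enumerate station).foldl (pvStepA canonical_digit random_sz mods) (0, 0)).1]) []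

-- ===== PORT B =====
-- Source B's 'l[j] += v' on an in-range nonnegative index
def pvBump (l : List Int) (j : Nat) (v : Int) : List Int := l.set j (l.getD j 0 + v)

-- body of Source B's bucketing pass: state (diff, point, base, dec), element (i, s)
def pvStepB (num_digits : Int) (mods : List Int) (acc : List Int × List Int × Int × Int) (is_ : Int × Int) : List Int × List Int × Int × Int :=
  let i := is_.1
  let s := is_.2
  let base := acc.2.2.1 + s * i * PySem.List.pyGetD mods (max (i - 1) 0) 0
  let diff :=
    if 0 < s then
      let diff1 := pvBump acc.1 0 (PySem.List.pyGetD mods i 0)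
      if s < num_digits then pvBump diff1 s.toNat (-(PySem.List.pyGetD mods i 0)) else diff1
    else acc.1
  let point := if 0 ≤ s ∧ s < num_digits then pvBump acc.2.1 s.toNat acc.2.2.2 else acc.2.1
  (diff, point, base, acc.2.2.2 + s * PySem.List.pyGetD mods i 0)

-- body of Source B's output sweep: state (offset, run), canonical digit d
def pvStepO (random_sz base : Int) (diff point : List Int) (acc : List Int × Int) (d : Int) : List Int × Int :=
  let run := acc.2 + PySem.List.pyGetD diff d 0
  (acc.1 ++ [PySem.Int.mod (base + run + PySem.List.pyGetD point d 0) random_sz], run)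

def get_digit_offsets_alt (station : List Int) (num_digits : Int) (random_sz : Int) (mods : List Int) : List Int :=
  if num_digits ≤ 0 then []
  else
    let st := (PySem.List.enumerate station).foldl (pvStepB num_digits mods)
      (List.replicate (num_digits + 1).toNat 0, List.replicate num_digits.toNat 0, 0, 0)
    ((PySem.List.pyRange 0 num_digits 1).foldl (pvStepO random_sz st.2.2.1 st.1 st.2.1) ([], 0)).1

-- ===== PRECONDITION & SPEC =====
-- Pre_ excludes exactly the inputs where Python raises (random_sz = 0 reaching '%', or mods
-- shorter than station reaching an IndexError) plus the corner where A returns with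
-- random_sz = 0 but B's single '%' sweep would divide: empty station with num_digits > 0.
def Pre_get_digit_offsets (station : List Int) (num_digits : Int) (random_sz : Int) (mods : List Int) : Prop :=
  num_digits ≤ 0 ∨ (random_sz ≠ 0 ∧ station.length ≤ mods.length)
instance (station : List Int) (num_digits : Int) (random_sz : Int) (mods : List Int) : Decidable (Pre_get_digit_offsets station num_digits random_sz mods) := by unfold Pre_get_digit_offsets; infer_instance

def pvWitness_get_digit_offsets : List Int × Int × Int × List Int := ([1, 0, 2], 3, 5, [1, 2, 3])

def Spec_get_digit_offsets (station : List Int) (num_digits : Int) (random_sz : Int) (mods : List Int) (out : List Int) : Prop := out = get_digit_offsets_alt station num_digits random_sz mods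
instance (station : List Int) (num_digits : Int) (random_sz : Int) (mods : List Int) (out : List Int) : Decidable (Spec_get_digit_offsets station num_digits random_sz mods out) := by unfold Spec_get_digit_offsets; infer_instance

-- ===== CLAIM (what is proved, stated in full; the proofs are below) =====
def Claim_equal_get_digit_offsets : Prop := ∀ (station : List Int) (num_digits : Int) (random_sz : Int) (mods : List Int), Dom_get_digit_offsets station num_digits random_sz mods → Pre_get_digit_offsets station num_digits random_sz mods → Spec_get_digit_offsets station num_digits random_sz mods (get_digit_offsets station num_digits random_sz mods)

-- ===== LEMMAS AND PROOFS =====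

-- total (un-modded) contribution of the suffix l of enumerate(station) to A's inner count,
-- starting from running decoration sum dec
def pvTsum (cd : Int) (mods : List Int) : List (Int × Int) → Int → Int
  | [], _ => 0
  | (i, s) :: t, dec =>
      (if s > cd then (1 : Int) else 0) * PySem.List.pyGetD mods i 0
        + s * i * PySem.List.pyGetD mods (max (i - 1) 0) 0
        + (if s = cd then (1 : Int) else 0) * dec
        + pvTsum cd mods t (dec + s * PySem.List.pyGetD mods i 0)

-- sum of the first n entries of l (0 past the end)
def pvPref (l : List Int) (n : Nat) : Int := ((List.range n).map (fun k => l.getD k 0)).sum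

theorem pvMod_absorb (a b m : Int) : PySem.Int.mod (PySem.Int.mod a m + b) m = PySem.Int.mod (a + b) m := by
  show (Int.fmod a m + b).fmod m = (a + b).fmod m
  conv_rhs => rw [← Int.fmod_add_fmod]

theorem pvMod_absorb4 (c x y z m : Int) :
    PySem.Int.mod (PySem.Int.mod c m + x + y + z) m = PySem.Int.mod (c + x + y + z) m := by
  have h : PySem.Int.mod c m + x + y + z = PySem.Int.mod c m + (x + y + z) := by ring
  rw [h, pvMod_absorb, ← add_assoc, ← add_assoc]

theorem pvInnerA (rs cd : Int) (mods : List Int) :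
    ∀ (l : List (Int × Int)) (c dec : Int),
      (l.foldl (pvStepA cd rs mods) (PySem.Int.mod c rs, dec)).1
        = PySem.Int.mod (c + pvTsum cd mods l dec) rs := by
  intro l
  induction l with
  | nil => intro c dec; simp [pvTsum]
  | cons x t ih =>
      intro c dec
      obtain ⟨i, s⟩ := x
      show (t.foldl (pvStepA cd rs mods)
          (PySem.Int.mod (PySem.Int.mod c rs
              + (if s > cd then (1 : Int) else 0) * PySem.List.pyGetD mods i 0
              + s * i * PySem.List.pyGetD mods (max (i - 1) 0) 0
              + (if s = cd then (1 : Int) else 0) * dec) rs,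
            dec + s * PySem.List.pyGetD mods i 0)).1
        = PySem.Int.mod (c + pvTsum cd mods ((i, s) :: t) dec) rs
      rw [pvMod_absorb4, ih]
      show _ = PySem.Int.mod (c + ((if s > cd then (1 : Int) else 0) * PySem.List.pyGetD mods i 0
          + s * i * PySem.List.pyGetD mods (max (i - 1) 0) 0
          + (if s = cd then (1 : Int) else 0) * dec
          + pvTsum cd mods t (dec + s * PySem.List.pyGetD mods i 0))) rs
      ring_nf

theorem pvBump_length (l : List Int) (j : Nat) (v : Int) : (pvBump l j v).length = l.length := by
  simp [pvBump]

theorem pvGetD_bump (l : List Int) (j : Nat) (v : Int) (hj : j < l.length) (k : Nat) :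
    (pvBump l j v).getD k 0 = l.getD k 0 + if k = j then v else 0 := by
  by_cases hkj : k = j
  · subst hkj
    simp [pvBump, List.getD_eq_getElem?_getD, hj]
  · simp [pvBump, List.getD_eq_getElem?_getD, hkj, Ne.symm hkj]

theorem pvPref_succ (l : List Int) (n : Nat) : pvPref l (n + 1) = pvPref l n + l.getD n 0 := by
  simp [pvPref, List.range_succ]

theorem pvPref_bump (l : List Int) (j : Nat) (v : Int) (hj : j < l.length) (n : Nat) :
    pvPref (pvBump l j v) n = pvPref l n + if j < n then v else 0 := by
  induction n with
  | zero => simp [pvPref]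
  | succ n ih =>
      rw [pvPref_succ, pvPref_succ, ih, pvGetD_bump l j v hj n]
      split_ifs <;> omega

theorem pvGetD_replicate0 (m k : Nat) : (List.replicate m (0 : Int)).getD k 0 = 0 := by
  by_cases h : k < m
  · simp [List.getD_eq_getElem?_getD, h]
  · simp [List.getD_eq_getElem?_getD, h]

theorem pvPref_replicate0 (m n : Nat) : pvPref (List.replicate m (0 : Int)) n = 0 := by
  induction n with
  | zero => simp [pvPref]
  | succ n ih => rw [pvPref_succ, ih, pvGetD_replicate0]; ring

theorem pvStepB_len (nd : Int) (mods : List Int) (acc : List Int × List Int × Int × Int) (is_ : Int × Int) :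
    (pvStepB nd mods acc is_).1.length = acc.1.length ∧ (pvStepB nd mods acc is_).2.1.length = acc.2.1.length := by
  simp only [pvStepB]
  split_ifs <;> simp [pvBump_length]

-- single-step effect on the quantity base + pref(diff, d+1) + point[d]
theorem pvStepB_contrib (nd : Int) (mods : List Int) (acc : List Int × List Int × Int × Int)
    (i s d : Int) (hd0 : 0 ≤ d) (hdn : d < nd)
    (hdl : acc.1.length = (nd + 1).toNat) (hpl : acc.2.1.length = nd.toNat) :
    (pvStepB nd mods acc (i, s)).2.2.1
      + pvPref (pvStepB nd mods acc (i, s)).1 (d.toNat + 1)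
      + (pvStepB nd mods acc (i, s)).2.1.getD d.toNat 0
    = acc.2.2.1 + pvPref acc.1 (d.toNat + 1) + acc.2.1.getD d.toNat 0
      + ((if s > d then (1 : Int) else 0) * PySem.List.pyGetD mods i 0
        + s * i * PySem.List.pyGetD mods (max (i - 1) 0) 0
        + (if s = d then (1 : Int) else 0) * acc.2.2.2) := by
  have h0l : 0 < acc.1.length := by omega
  simp only [pvStepB]
  by_cases hs0 : 0 < s
  · rw [if_pos hs0]
    by_cases hsn : s < nd
    · have hst : s.toNat < (pvBump acc.1 0 (PySem.List.pyGetD mods i 0)).length := by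
        rw [pvBump_length]; omega
      have hpt : s.toNat < acc.2.1.length := by omega
      rw [if_pos hsn, if_pos (show 0 ≤ s ∧ s < nd from ⟨by omega, hsn⟩)]
      rw [pvPref_bump _ _ _ hst, pvPref_bump _ _ _ h0l, pvGetD_bump _ _ _ hpt]
      split_ifs <;> omega
    · rw [if_neg hsn, if_neg (show ¬ (0 ≤ s ∧ s < nd) by omega)]
      rw [pvPref_bump _ _ _ h0l]
      split_ifs <;> omega
  · rw [if_neg hs0]
    by_cases hse : 0 ≤ s ∧ s < nd
    · have hpt : s.toNat < acc.2.1.length := by omega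
      rw [if_pos hse, pvGetD_bump _ _ _ hpt]
      split_ifs <;> omega
    · rw [if_neg hse]
      split_ifs <;> omega

theorem pvFoldB_len (nd : Int) (mods : List Int) :
    ∀ (l : List (Int × Int)) (acc : List Int × List Int × Int × Int),
      (l.foldl (pvStepB nd mods) acc).1.length = acc.1.length
        ∧ (l.foldl (pvStepB nd mods) acc).2.1.length = acc.2.1.length := by
  intro l
  induction l with
  | nil => intro acc; exact ⟨rfl, rfl⟩
  | cons x t ih =>
      intro acc
      rw [List.foldl_cons]
      have h1 := pvStepB_len nd mods acc x
      have h2 := ih (pvStepB nd mods acc x)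
      exact ⟨h2.1.trans h1.1, h2.2.trans h1.2⟩

theorem pvFoldB_inv (nd : Int) (mods : List Int) :
    ∀ (l : List (Int × Int)) (acc : List Int × List Int × Int × Int),
      acc.1.length = (nd + 1).toNat → acc.2.1.length = nd.toNat →
      ∀ d : Int, 0 ≤ d → d < nd →
        (l.foldl (pvStepB nd mods) acc).2.2.1
          + pvPref (l.foldl (pvStepB nd mods) acc).1 (d.toNat + 1)
          + (l.foldl (pvStepB nd mods) acc).2.1.getD d.toNat 0
        = acc.2.2.1 + pvPref acc.1 (d.toNat + 1) + acc.2.1.getD d.toNat 0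
          + pvTsum d mods l acc.2.2.2 := by
  intro l
  induction l with
  | nil => intro acc _ _ d _ _; simp [pvTsum]
  | cons x t ih =>
      intro acc hdl hpl d hd0 hdn
      obtain ⟨i, s⟩ := x
      rw [List.foldl_cons]
      have hlen := pvStepB_len nd mods acc (i, s)
      rw [ih (pvStepB nd mods acc (i, s)) (hlen.1.trans hdl) (hlen.2.trans hpl) d hd0 hdn]
      rw [pvStepB_contrib nd mods acc i s d hd0 hdn hdl hpl]
      have hdec : (pvStepB nd mods acc (i, s)).2.2.2
          = acc.2.2.2 + s * PySem.List.pyGetD mods i 0 := rfl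
      rw [hdec]
      show _ = _ + ((if s > d then (1 : Int) else 0) * PySem.List.pyGetD mods i 0
        + s * i * PySem.List.pyGetD mods (max (i - 1) 0) 0
        + (if s = d then (1 : Int) else 0) * acc.2.2.2
        + pvTsum d mods t (acc.2.2.2 + s * PySem.List.pyGetD mods i 0))
      ring

theorem pvOutLoop (rs base : Int) (diff point : List Int) (nd : Int)
    (hdl : nd ≤ (diff.length : Int)) (hpl : nd ≤ (point.length : Int)) :
    ∀ (cnt : Nat) (j : Int), 0 ≤ j → j + cnt = nd → ∀ (acc : List Int) (run : Int),
      run = pvPref diff j.toNat →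
      ((PySem.List.pyRange j nd 1).foldl (pvStepO rs base diff point) (acc, run)).1
        = acc ++ (PySem.List.pyRange j nd 1).map
            (fun d => PySem.Int.mod (base + pvPref diff (d.toNat + 1) + point.getD d.toNat 0) rs) := by
  intro cnt
  induction cnt with
  | zero =>
      intro j hj0 hjn acc run hrun
      rw [PySem.List.pyRange_one_eq_nil (by omega)]
      simp
  | succ cnt ih =>
      intro j hj0 hjn acc run hrun
      have hjlt : j < nd := by omega
      rw [PySem.List.pyRange_one_cons hjlt, List.foldl_cons, List.map_cons]
      have hdj : PySem.List.pyGetD diff j 0 = diff.getD j.toNat 0 := by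
        rw [PySem.List.pyGetD_eq_getElem _ _ hj0 (by omega), List.getD_eq_getElem _ _ (by omega)]
      have hpj : PySem.List.pyGetD point j 0 = point.getD j.toNat 0 := by
        rw [PySem.List.pyGetD_eq_getElem _ _ hj0 (by omega), List.getD_eq_getElem _ _ (by omega)]
      show ((PySem.List.pyRange (j + 1) nd 1).foldl (pvStepO rs base diff point)
          (acc ++ [PySem.Int.mod (base + (run + PySem.List.pyGetD diff j 0) + PySem.List.pyGetD point j 0) rs],
            run + PySem.List.pyGetD diff j 0)).1 = _
      rw [hdj, hpj, hrun, ← pvPref_succ]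
      have ht : (j + 1).toNat = j.toNat + 1 := by omega
      rw [ih (j + 1) (by omega) (by omega) _ _ (by rw [ht])]
      simp

theorem get_digit_offsets_spec : Claim_equal_get_digit_offsets := by
  intro station nd rs mods _ _
  show get_digit_offsets station nd rs mods = get_digit_offsets_alt station nd rs mods
  by_cases h : nd ≤ 0
  · simp [get_digit_offsets, get_digit_offsets_alt, h, PySem.List.pyRange_one_eq_nil h]
  · have hnd : 0 < nd := by omega
    simp only [get_digit_offsets, get_digit_offsets_alt, if_neg h]
    rw [PySem.List.foldl_append_singleton_eq_map]
    have hlen := pvFoldB_len nd mods (PySem.List.enumerate station)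
      (List.replicate (nd + 1).toNat 0, List.replicate nd.toNat 0, 0, 0)
    rw [pvOutLoop rs _ _ _ nd (by rw [hlen.1]; simp only [List.length_replicate]; omega)
      (by rw [hlen.2]; simp only [List.length_replicate]; omega)
      nd.toNat 0 le_rfl (by omega) [] 0 (by simp [pvPref])]
    rw [List.nil_append]
    apply List.map_congr_left
    intro d hd
    rw [PySem.List.mem_pyRange_one] at hd
    have hz : ((0 : Int), (0 : Int)) = (PySem.Int.mod 0 rs, (0 : Int)) := by
      rw [show PySem.Int.mod 0 rs = 0 from Int.zero_fmod rs]
    conv_lhs => rw [hz, pvInnerA rs d mods (PySem.List.enumerate station) 0 0]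
    have hinv := pvFoldB_inv nd mods (PySem.List.enumerate station)
      (List.replicate (nd + 1).toNat 0, List.replicate nd.toNat 0, 0, 0)
      (by simp) (by simp) d hd.1 hd.2
    rw [hinv, pvPref_replicate0, pvGetD_replicate0]
    norm_num
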